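/- GENERATED by tools/from_farm_form.py from prooffarm-gif/accepted/DGifGetImageHeader.5/Lemmas.lean (a worked proof of the farm's unit `DGifGetImageHeader.5`,
   accepted by the verdict) — do not edit. -/
import Gif.Spec.Units.DGifGetImageHeader_5
import Gif.Spec.AllSegs

/-!
  Lemmas for the unit `DGifGetImageHeader.5` (segment 5 of `DGifGetImageHeader`, 10902FH … 1090CEH, dgif_lib.c:412-414 and the
  `i++` of l.404): the three checked byte stores `Colors[i].Red / .Green / .Blue = Buf[0 / 1 / 2]` of one round of the colour loop.

      gih5_MapFacts      what the state invariant says of the adopted map `Fc.icm = some mp`: the two objects are live, where they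
                         are (numbers), that the colour array is FAR from gif and from the map object (FO2), the two field reads
      gih5_map_facts     … from `HeapOK` and `GifOK`
      gih5_carry         `HeapInv ∧ GifOK ∧ rem` through a footprint "own stack + one DATA object of the forest" (`Loose.data`)
      gih5_body_carry    `Body cut` → `Body cut'` through such a footprint (slots, `same`, the three invariants)
      gih5_zext_small    `mov eax, r14d` of a small counter: the register itself (a fact for the walker)
      gih5_next_counter  `add r14d, 1` of a small counter, as a number
      gih5_seg           THE WALK: `Colour m` at 10902FH → `Head m'` at 108FFEH with `m' < m`
-/

open X86 X86.User Asan ProgX.Base ProgX.Base.Spec Gif.Spec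

set_option maxRecDepth 4000
set_option maxHeartbeats 4000000

namespace Gif.Spec.DGifGetImageHeader_5

/-- **What the state invariant says of the adopted local map** `Fc.icm = some mp` (CM1, CM3, FO2), as the walk needs it: the colour
array is a DATA object of the forest; both objects are live; the two pointer fields as `rd`; the count; where gif, the map object
and the colour array are (numbers, for `v_side` / `u_same` / `u_omega`); the colour array is at least 64 bytes away from gif and
from the map object (so a store into it is read through by the loads of `gif.Image.ColorMap` and of `Colors`). -/
structure gih5_MapFacts (Hc : Heap) (Fc : Forest) (mem : Mem) (mp : Map) : Prop where
  data : (mp.colors, 3 * mp.count) ∈ Fc.datas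
  live_obj : Hc.Live mp.obj 24
  live_col : Hc.Live mp.colors (3 * mp.count)
  rd_map : rd mem (Fc.gif + 64) 8 = mp.obj
  rd_col : rd mem (mp.obj + 16) 8 = mp.colors
  count_le : mp.count ≤ 256
  gif_lo : 0x800040 ≤ Fc.gif
  gif_hi : Fc.gif + 152 ≤ 0xC00000
  obj_lo : 0x800040 ≤ mp.obj
  obj_hi : mp.obj + 56 ≤ 0xC00000
  col_lo : 0x800040 ≤ mp.colors
  col_hi : mp.colors + 3 * mp.count + 32 ≤ 0xC00000
  far_gif : mp.colors + 3 * mp.count + 64 ≤ Fc.gif ∨ Fc.gif + 120 + 64 ≤ mp.colors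
  far_obj : mp.colors + 3 * mp.count + 64 ≤ mp.obj ∨ mp.obj + 24 + 64 ≤ mp.colors

/-- **The facts of the adopted map**, from the heap's chain invariant and the state invariant. -/
theorem gih5_map_facts {Hc : Heap} {Fc : Forest} {R : Rd} {mem : Mem} {mp : Map} (hhok : HeapOK Hc mem)
    (hok : GifOK Hc Fc R mem) (hicm : Fc.icm = some mp) (hbase : Hc.base = 0x800000) : gih5_MapFacts Hc Fc mem mp := by
  -- CM3 / CM1: what the fields hold
  have hicmAt := hok.shape.icm
  rw [hicm] at hicmAt
  obtain ⟨hp_obj, _, hp_col, _, hcnt256⟩ := hicmAt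
  simp only [gfield] at hp_obj hp_col
  -- the two objects of the map are owned; the colour array is a data object, the map object a structural one
  have hmo : Map.objs Fc.icm = [(mp.obj, 24), (mp.colors, 3 * mp.count)] := by
    rw [hicm]
    rfl
  have hin_obj : (mp.obj, 24) ∈ Fc.owned := by
    apply (Forest.owned_icm Fc).symm.subset
    apply List.mem_append_left
    rw [hmo]
    exact List.mem_cons_self
  have hin_col : (mp.colors, 3 * mp.count) ∈ Fc.owned := by
    apply (Forest.owned_icm Fc).symm.subset
    apply List.mem_append_left
    rw [hmo]
    exact List.mem_cons_of_mem _ List.mem_cons_self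
  have hd_col : (mp.colors, 3 * mp.count) ∈ Fc.datas := by
    unfold Forest.datas
    apply List.mem_append_left
    apply List.mem_append_left
    apply List.mem_append_right
    rw [hicm]
    exact List.mem_cons_self
  have hs_obj : (mp.obj, 24) ∈ Fc.structs := by
    apply carry_mem_structs_icm
    rw [hicm]
    exact List.mem_cons_self
  -- where they are
  have hgin := hok.owns.inside hhok (o := (Fc.gif, 120)) List.mem_cons_self
  have hoin := hok.owns.inside hhok hin_obj
  have hcin := hok.owns.inside hhok hin_col
  simp only at hgin hoin hcin
  rw [hbase] at hgin hoin hcin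
  -- FO2: the colour array is another entry than gif and than the map object
  have hpl := (hok.owns.placed hhok).structs_ne.2 _ hd_col
  have hn_gif := hpl.1
  have hn_obj := hpl.2.2 _ hs_obj
  simp only at hn_gif hn_obj
  have hne1 : ((mp.colors, 3 * mp.count) : Nat × Nat) ≠ (Fc.gif, 120) := by
    intro h
    exact hn_gif (congrArg Prod.fst h)
  have hne2 : ((mp.colors, 3 * mp.count) : Nat × Nat) ≠ (mp.obj, 24) := by
    intro h
    exact hn_obj (congrArg Prod.fst h).symm
  have hfar_gif := hok.owns.far hhok hin_col List.mem_cons_self hne1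
  have hfar_obj := hok.owns.far hhok hin_col hin_obj hne2
  simp only at hfar_gif hfar_obj
  exact {
    data := hd_col
    live_obj := hok.owns.live _ hin_obj
    live_col := hok.owns.live _ hin_col
    rd_map := hp_obj
    rd_col := hp_col
    count_le := hcnt256
    gif_lo := by omega
    gif_hi := by omega
    obj_lo := by omega
    obj_hi := by omega
    col_lo := by omega
    col_hi := by omega
    far_gif := hfar_gif
    far_obj := hfar_obj
  }

/-- **`HeapInv ∧ GifOK ∧ rem` through a footprint "stack below the cursor + one DATA object of the forest"** (the check calls' return
addresses, the spill slot, the bytes stored into the colour array): the stack window is off the heap and `Loose.stack`, the data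
window lies inside a live object and is `Loose.data`; neither meets the cursor. -/
theorem gih5_carry {Hc : Heap} {rest : List Obj} {frames : List (Nat × FrameLayout)} {Fc : Forest} {R : Rd} {top lo hi : Nat}
    {mem mem' : Mem} {d : Nat × Nat} (hinv : HeapInv Hc rest frames top mem) (hok : GifOK Hc Fc R mem)
    (hcur : 0x700000 ≤ R.cur ∧ R.cur + 16 ≤ 0x800000) (hbase : Hc.base = 0x800000) (hd : d ∈ Fc.datas)
    (hun : ShadowUntouched mem mem') (hs : Mem.SameExcept [⟨lo, hi⟩, ⟨d.1, d.1 + d.2⟩] mem mem')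
    (hlo : 0x700000 ≤ lo) (hhi : hi ≤ R.cur) :
    HeapInv Hc rest frames top mem' ∧ GifOK Hc Fc R mem' ∧ rem R mem' = rem R mem := by
  have hhok := hinv.heap
  obtain ⟨c, hlc⟩ := hok.owns.live d (Fc.datas_owned d hd)
  have hsc := hhok.size_le_cap hlc
  have hin := hok.owns.inside hhok (Fc.datas_owned d hd)
  simp only at hsc
  rw [hbase] at hin
  have hd1 := hin.1
  refine ⟨?_, ?_, ?_⟩
  · -- the heap's invariant: the stack window is below the region, the data window inside the object's capacity
    apply hinv.sameExcept hun hs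
    intro w hw
    rcases List.mem_cons.mp hw with e1 | hw2
    · left
      left
      rw [e1, hbase]
      simp only
      omega
    · have e2 := List.mem_singleton.mp hw2
      right
      refine ⟨_, hlc, ?_, ?_⟩
      · rw [e2]
        exact Nat.le_refl _
      · rw [e2]
        simp only
        omega
  · -- the state invariant: both windows are loose
    apply hok.sameExcept hhok hcur hs
    intro w hw
    rcases List.mem_cons.mp hw with e1 | hw2
    · rw [e1]
      apply Loose.stack hhok
      · exact hlo
      · simp only
        omega
      · exact hhi
    · have e2 := List.mem_singleton.mp hw2
      rw [e2]
      exact Loose.data hhok hok.owns hd (Nat.le_refl _) (Nat.le_refl _)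
  · -- the reader's measure: neither window meets the cursor
    apply rem_sameExcept hs (by omega)
    intro w hw
    rcases List.mem_cons.mp hw with e1 | hw2
    · rw [e1]
      left
      exact hhi
    · have e2 := List.mem_singleton.mp hw2
      rw [e2]
      right
      simp only
      omega

/-- **`Body` through a footprint "own stack below the body's `rsp` + one DATA object of the forest"**: from `Body cut` at `v` to
`Body cut'` at a state `s` with the same `rsp`, `rbx`, `rbp`, whose memory differs from `v`'s in the stack window `[RA − 448, RA − 120)` (below the protected frame: the return addresses of the check calls, the spill slot `[rsp+0xf]`)
and in the data object `d` only, the shadow untouched. The slots lie at or above `RA − 48`; `same` by transitivity; the three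
invariants by `gih5_carry`. -/
theorem gih5_body_carry {cut cut' : Word} {H : Heap} {rest : List Obj} {frames : List (Nat × FrameLayout)} {F : Forest} {R : Rd}
    {Hc : Heap} {Fc : Forest} {u₀ e : State} {ret : Word} {v s : State} {d : Nat × Nat}
    (hb : DGifGetImageHeader.Body cut H rest frames F R Hc Fc u₀ e ret v) (hd : d ∈ Fc.datas)
    (hrip : s.rip = cut') (hrsp : s.reg .rsp = v.reg .rsp) (hrbx : s.reg .rbx = v.reg .rbx) (hrbp : s.reg .rbp = v.reg .rbp)
    (hcode : (conv u₀).code.In s.mem) (habi : (conv u₀).inv s) (hun : ShadowUntouched v.mem s.mem)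
    (hs : Mem.SameExcept [⟨(e.reg .rsp).toNat - 448, (e.reg .rsp).toNat - 120⟩, ⟨d.1, d.1 + d.2⟩] v.mem s.mem) :
    DGifGetImageHeader.Body cut' H rest frames F R Hc Fc u₀ e ret s := by
  have he_room : 0x700000 + 448 ≤ (e.reg .rsp).toNat := hb.entry.room
  have he_top : (e.reg .rsp).toNat + 8 ≤ 0x800000 := hb.entry.top
  obtain ⟨henv, hrdi⟩ := hb.pre
  have hcur := henv.ctx.cursor_range henv.heap.inv.shadow
  have hbase : Hc.base = 0x800000 := by
    rw [hb.region.1]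
    exact henv.heap.base
  -- where the data object is
  have hin := hb.ok.owns.inside hb.inv.heap (Fc.datas_owned d hd)
  rw [hbase] at hin
  have hd1 := hin.1
  have hd2 := hin.2.2.2.2
  clear hin
  -- the three invariants
  obtain ⟨hinv', hok', hrem'⟩ := gih5_carry hb.inv hb.ok ⟨hcur.1, hcur.2.1⟩ hbase hd hun hs (by omega) (by omega)
  -- a read at or above RA − 120 and below 800000H misses both windows
  have hread : ∀ (a : Word) (k : Nat), (e.reg .rsp).toNat - 120 ≤ a.toNat → a.toNat + k ≤ 0x800000 →
      s.mem.readLE a k = v.mem.readLE a k := by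
    intro a k h1 h2
    apply hs.readLE a k (by omega)
    intro w hw
    rcases List.mem_cons.mp hw with e1 | hw2
    · rw [e1]
      right
      exact h1
    · have e2 := List.mem_singleton.mp hw2
      rw [e2]
      left
      simp only
      omega
  exact {
    entry := hb.entry
    pre := hb.pre
    rip := hrip
    rsp := hrsp.trans hb.rsp
    rbx := hrbx.trans hb.rbx
    rbp := hrbp.trans hb.rbp
    slot_r15 := by
      rw [hread _ 8 (by u_omega) (by u_omega)]
      exact hb.slot_r15
    slot_r14 := by
      rw [hread _ 8 (by u_omega) (by u_omega)]
      exact hb.slot_r14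
    slot_r13 := by
      rw [hread _ 8 (by u_omega) (by u_omega)]
      exact hb.slot_r13
    slot_r12 := by
      rw [hread _ 8 (by u_omega) (by u_omega)]
      exact hb.slot_r12
    slot_rbp := by
      rw [hread _ 8 (by u_omega) (by u_omega)]
      exact hb.slot_rbp
    slot_rbx := by
      rw [hread _ 8 (by u_omega) (by u_omega)]
      exact hb.slot_rbx
    slot_ra := by
      rw [hread _ 8 (by u_omega) (by u_omega)]
      exact hb.slot_ra
    inv := hinv'
    region := hb.region
    forest := hb.forest
    ok := hok'
    rem := by
      rw [hrem']
      exact hb.rem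
    same := by
      apply hb.same.trans
      apply hs.mono
      intro w hw a h1 h2
      rcases List.mem_cons.mp hw with e1 | hw2
      · rw [e1] at h1 h2
        simp only at h1 h2
        refine ⟨_, List.mem_cons_self, ?_, ?_⟩
        · simp only
          omega
        · simp only
          omega
      · have e2 := List.mem_singleton.mp hw2
        rw [e2] at h1 h2
        simp only at h1 h2
        refine ⟨_, List.mem_cons_of_mem _ (List.mem_cons_of_mem _ List.mem_cons_self), ?_, ?_⟩
        · simp only
          omega
        · simp only
          omega
    code := hcode
    abi := habi
  }

/-- **`mov eax, r14d` of a counter below `2 ^ 32`**: the zero-extended low half is the register itself. A `Word` equation for the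
facts list of `u_walk` (the address `Colors + 3·i` then stays linear in `v.reg .r14`). -/
theorem gih5_zext_small (x : Word) (h : x.toNat < 2 ^ 32) : Word.ofBV (Word.part .w32 x) = x := by
  apply UInt64.toNat_inj.mp
  rw [toNat_ofBV32, toNat_part32]
  omega

/-- **`add r14d, 1`** (`i++`, dgif_lib.c:404) of a counter below `2 ^ 32 − 1`: the number plus one. -/
theorem gih5_next_counter (x : Word) (h : x.toNat + 1 < 2 ^ 32) :
    (Word.ofBV (Word.part .w32 x + 1#32)).toNat = x.toNat + 1 := by
  have e1 : (1#32 : BitVec 32).toNat = 1 := rfl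
  rw [toNat_ofBV32, BitVec.toNat_add, toNat_part32, e1]
  omega

/-- **SEGMENT 5, THE WALK** (10902FH … 1090C9H `jmp 108FFEH`; dgif_lib.c:412-414, `i++` of l.404): from `Colour m` (one colour is in
`Buf`, `i < ColorCount`) through the three checked byte stores into the colour array of the adopted map to the loop head, `Head m'`
with `m' = ColorCount − (i + 1) < m`. -/
theorem gih5_seg (Lay : Layout) (hLay : Lay.hi = 0x1000000) (μ : Microarch) (hμ : UserX.MicroOK μ) (u₀ : State)
    (hcode : HasCodeNat Lay u₀ Gif.L.DGifGetImageHeader.entry Gif.Code.code_DGifGetImageHeader.nat Gif.L.DGifGetImageHeader.size)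
    (h_load8 : Asan.SmallCheck Lay μ ProgX.Base.WayInv (ProgX.Base.CodeOK u₀) [.rax, .rcx, .rdx] 8
      ProgX.Base.L.__asan_load8_noabort.entry)
    (h_store1 : Asan.SmallCheck Lay μ ProgX.Base.WayInv (ProgX.Base.CodeOK u₀) [.rax, .rdx] 1
      ProgX.Base.L.__asan_store1_noabort.entry)
    (H : Heap) (rest : List Obj) (frames : List (Nat × FrameLayout)) (F : Forest) (R : Rd) (e : State) (ret : Word) (m : Nat)
    (Hc : Heap) (Fc : Forest) (v : State) (hat : DGifGetImageHeader.Colour m H rest frames F R Hc Fc u₀ e ret v) :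
    ReachVia Lay μ ProgX.Base.WayInv v
      (fun w => ∃ m', m' < m ∧ DGifGetImageHeader.Head m' H rest frames F R Hc Fc u₀ e ret w) := by
  -- THE PRELUDE: the entry assertion `Colour` = `Mid` (`Body` + `r12 = pv`) + the map, the counter, the measure
  obtain ⟨⟨hbody, h_r12⟩, mp, hicm, hlt, hm⟩ := hat
  have he := hbody.entry
  v_entry he
  obtain ⟨henv, hrdi⟩ := hbody.pre
  -- what the walker reads of a segment's entry state: rip, rsp and rbx (as `c_*`), the registers kept, the text, DF / MXCSR
  have w_rip := hbody.rip
  have c_rsp : v.reg .rsp = e.reg .rsp - 136 := hbody.rsp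
  have c_rbx : v.reg .rbx = e.reg .rdi := hbody.rbx
  have w_kept : RegsKept [.rsp] v v := RegsKept.refl _ _
  have w_eq : Mem.EqOn ProgX.Base.L.textLo ProgX.Base.L.textHi u₀.mem v.mem := ProgX.Base.conv_code_eqOn hbody.code
  have hdf := (show abiInv _ from hbody.abi).1
  have hmx := (show abiInv _ from hbody.abi).2
  have hsse := ProgX.Base.sseOK_of_abiInv hbody.abi
  have hcur := henv.ctx.cursor_range henv.heap.inv.shadow
  -- THE NUMBERS: where gif, the map object and the colour array are; the colour array is far from the other two (FO2)
  have hbase : Hc.base = 0x800000 := by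
    rw [hbody.region.1]
    exact henv.heap.base
  have hgif : Fc.gif = F.gif := hbody.forest.1
  have hmf := gih5_map_facts hbody.inv.heap hbody.ok hicm hbase
  have hcnt256 := hmf.count_le
  have hg_lo := hmf.gif_lo
  have hg_hi := hmf.gif_hi
  have ho_lo := hmf.obj_lo
  have ho_hi := hmf.obj_hi
  have hk_lo := hmf.col_lo
  have hk_hi := hmf.col_hi
  have hfar_gif := hmf.far_gif
  have hfar_obj := hmf.far_obj
  have hp_map := hmf.rd_map
  have hp_col := hmf.rd_col
  rw [hgif] at hg_lo hg_hi hfar_gif hp_map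
  -- THE LOADS of l.412-414, in the walker's form: `gif.Image.ColorMap` (CM3) and its `Colors` field (CM1)
  have l_icm : v.mem.readLE (e.reg .rdi + 0x40) 8 = mp.obj := by
    rw [rd_eq_readLE v.mem _ (F.gif + 64) 8 (by u_omega)]
    exact hp_map
  have e_obj : (UInt64.ofNat mp.obj).toNat = mp.obj := toNat_ofNat_addr mp.obj (by omega)
  have l_col : v.mem.readLE (UInt64.ofNat mp.obj + 0x10) 8 = mp.colors := by
    rw [rd_eq_readLE v.mem _ (mp.obj + 16) 8 (by u_omega)]
    exact hp_col
  have e_col : (UInt64.ofNat mp.colors).toNat = mp.colors := toNat_ofNat_addr mp.colors (by omega)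
  -- the live ranges the seven checks ask
  have hgl : LiveIn (Hc.liveObjs ++ rest) (DGifGetImageHeader.framesIn frames e) F.gif 120 := by
    rw [← hgif]
    exact hbody.ok.gif_live.liveIn rest _ (Nat.le_refl _) (Nat.le_refl _)
  have hol : LiveIn (Hc.liveObjs ++ rest) (DGifGetImageHeader.framesIn frames e) mp.obj 24 :=
    hmf.live_obj.liveIn rest _ (Nat.le_refl _) (Nat.le_refl _)
  have hkl : LiveIn (Hc.liveObjs ++ rest) (DGifGetImageHeader.framesIn frames e) mp.colors (3 * mp.count) :=
    hmf.live_col.liveIn rest _ (Nat.le_refl _) (Nat.le_refl _)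
  -- `mov eax, r14d`: the counter is small, so `rax = r14` and `r13 = r14 + r14 * 2`
  have hz : Word.ofBV (Word.part .w32 (v.reg .r14)) = v.reg .r14 := gih5_zext_small _ (by omega)
  -- THE WALK, to the loop head
  u_walk hcode [hμ.vendor, hz] until [Gif.L.DGifGetImageHeader.at_108ffe]
    span [ProgX.Base.L.textLo, ProgX.Base.L.textHi] side (v_side)
  case check_109033 =>
    -- l.412 the load of `gif.Image.ColorMap`: 8 bytes inside gif
    have hun : ShadowUntouched v.mem s_109033.mem := by v_untouched
    exact hgl.accSmall hbody.inv.shadow hun _ 8 (by decide) (by u_omega) (by u_omega)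
  case check_109040 =>
    -- l.412 the load of `ColorMap->Colors`: 8 bytes inside the map object
    have hun : ShadowUntouched v.mem s_109040.mem := by v_untouched
    exact hol.accSmall hbody.inv.shadow hun _ 8 (by decide) (by u_omega) (by u_omega)
  case check_109062 =>
    -- l.412 the store of `Colors[i].Red`: byte `3·i` of the colour array, `i < ColorCount`
    have hun : ShadowUntouched v.mem s_109062.mem := by v_untouched
    exact hkl.accSmall hbody.inv.shadow hun _ 1 (by decide) (by u_omega) (by u_omega)
  case check_109077 =>
    -- l.413 the load of `ColorMap->Colors`
    have hun : ShadowUntouched v.mem s_109077.mem := by v_untouched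
    exact hol.accSmall hbody.inv.shadow hun _ 8 (by decide) (by u_omega) (by u_omega)
  case check_109093 =>
    -- l.413 the store of `Colors[i].Green`: byte `3·i + 1`
    have hun : ShadowUntouched v.mem s_109093.mem := by v_untouched
    exact hkl.accSmall hbody.inv.shadow hun _ 1 (by decide) (by u_omega) (by u_omega)
  case check_1090a9 =>
    -- l.414 the load of `ColorMap->Colors`
    have hun : ShadowUntouched v.mem s_1090a9.mem := by v_untouched
    exact hol.accSmall hbody.inv.shadow hun _ 8 (by decide) (by u_omega) (by u_omega)
  case check_1090bc =>
    -- l.414 the store of `Colors[i].Blue`: byte `3·i + 2`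
    have hun : ShadowUntouched v.mem s_1090bc.mem := by v_untouched
    exact hkl.accSmall hbody.inv.shadow hun _ 1 (by decide) (by u_omega) (by u_omega)
  -- 0x108ffe (l.404): THE LOOP HEAD, behind `add r14d, 1 ; jmp`
  -- what was stored: the check calls' return addresses and the spill slot (own stack), three bytes of the colour array
  have hun : ShadowUntouched v.mem s_1090c9.mem := by v_untouched
  have hs : Mem.SameExcept [⟨(e.reg .rsp).toNat - 448, (e.reg .rsp).toNat - 120⟩,
      ⟨mp.colors, mp.colors + 3 * mp.count⟩] v.mem s_1090c9.mem := by
    rw [w_mem]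
    u_same
  have habi : (conv u₀).inv s_1090c9 := by
    refine ProgX.Base.abiInv_of ?_ ?_
    · rw [w_flags]
      simp only [X86.User.df_setStatus]
      exact w_df_1090bc
    · rw [w_mxcsr]
      exact hmx
  -- `Body` at the head, by the carry lemma
  have hbody1 : DGifGetImageHeader.Body Gif.L.DGifGetImageHeader.at_108ffe H rest frames F R Hc Fc u₀ e ret s_1090c9 :=
    gih5_body_carry (d := (mp.colors, 3 * mp.count)) hbody hmf.data w_rip (w_rsp.trans c_rsp.symm) (w_kept.get .rbx rfl)
      (w_kept.get .rbp rfl) (ProgX.Base.conv_code_in w_eq) habi hun hs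
  -- the new counter
  have hnext : (s_1090c9.reg .r14).toNat = (v.reg .r14).toNat + 1 := by
    rw [w_r14]
    exact gih5_next_counter _ (by omega)
  -- `Head` with the measure `ColorCount − (i + 1)`
  refine ReachVia.done ⟨mp.count - ((v.reg .r14).toNat + 1), by omega, ?_⟩
  exact {
    mid := {
      body := hbody1
      r12 := by
        rw [w_kept.get .r12 rfl]
        exact h_r12
    }
    loop := by
      refine ⟨mp, hicm, ?_, ?_⟩
      · rw [hnext]
        omega
      · rw [hnext]
  }

end Gif.Spec.DGifGetImageHeader_5
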